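-- pv_equiv track=rewrite | github.com/akhter-areena/syde-599-project | eval/Evaluate.py | computeRecommendedSongsClicks
-- ===== SOURCE A (Python) =====
-- def computeRecommendedSongsClicks(predictions, ground_truth):
--     num_clicks = 0
--     for i in range(0, len(predictions), 10):
--         currTen = predictions[i:i+10]
--
--         # If any of the current 10 songs overlap with the ground_truth, return
--         overlap = [value for value in currTen if value in ground_truth]
--         if len(overlap) > 0:
--             return num_clicks
--
--         num_clicks += 1
--
--     # If we go through all the number of clicks, we return 51
--     return 51
-- ===== SOURCE B (Python) =====
-- def computeRecommendedSongsClicks(predictions, ground_truth):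
--     gt = set(ground_truth)
--     for i, value in enumerate(predictions):
--         if value in gt:
--             return i // 10
--     return 51
-- ===== Notes on version B (the rewrite author's own statement) =====
-- stated objective: simpler
-- what changed: Replaces the 10-wide slicing with per-chunk overlap lists by a single flat scan over enumerate(predictions) that returns first_hit_index // 10 (ground_truth pre-converted to a set for O(1) membership), returning 51 when no prediction matches.
import Mathlib
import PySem

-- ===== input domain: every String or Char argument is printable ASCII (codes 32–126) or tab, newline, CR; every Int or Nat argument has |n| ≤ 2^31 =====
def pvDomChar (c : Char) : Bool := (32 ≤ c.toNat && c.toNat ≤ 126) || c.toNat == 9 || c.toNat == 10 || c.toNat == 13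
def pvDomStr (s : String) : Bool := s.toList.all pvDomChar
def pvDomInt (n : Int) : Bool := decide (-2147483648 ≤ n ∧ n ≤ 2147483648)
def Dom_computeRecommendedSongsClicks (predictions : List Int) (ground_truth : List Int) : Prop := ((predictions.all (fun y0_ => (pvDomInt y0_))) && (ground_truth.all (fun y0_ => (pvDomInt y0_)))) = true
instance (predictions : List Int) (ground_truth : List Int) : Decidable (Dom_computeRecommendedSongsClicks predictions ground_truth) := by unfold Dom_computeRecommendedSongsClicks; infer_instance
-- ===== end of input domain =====

-- B replaces A's 10-wide slice-per-chunk scan by one flat scan over enumerate(predictions)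
-- returning first_hit_index // 10 (ground_truth as a set); objective: simpler.


-- ===== PORT A =====
-- the for-loop over range(0, len(predictions), 10): state is num_clicks
def pvAGo (predictions ground_truth : List Int) (idxs : List Int) (num_clicks : Int) : Int :=
  match idxs with
  | [] => 51
  | i :: rest =>
      let currTen := PySem.List.slice predictions (some i) (some (i + 10))
      let overlap := currTen.filter (fun value => ground_truth.contains value)
      if overlap.length > 0 then num_clicks
      else pvAGo predictions ground_truth rest (num_clicks + 1)

def computeRecommendedSongsClicks (predictions : List Int) (ground_truth : List Int) : Int :=
  pvAGo predictions ground_truth (PySem.List.pyRange 0 (PySem.List.len predictions) 10) 0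

-- ===== PORT B =====
-- the for-loop over enumerate(predictions); early return i // 10 on first hit
def pvBGo (gt : PySem.Set Int) (pairs : List (Int × Int)) : Int :=
  match pairs with
  | [] => 51
  | (i, value) :: rest =>
      if PySem.Set.contains gt value then PySem.Int.floordiv i 10
      else pvBGo gt rest

def computeRecommendedSongsClicks_alt (predictions : List Int) (ground_truth : List Int) : Int :=
  let gt := PySem.Set.ofList ground_truth
  pvBGo gt (PySem.List.enumerate predictions 0)

-- ===== PRECONDITION & SPEC =====
def Spec_computeRecommendedSongsClicks (predictions : List Int) (ground_truth : List Int) (out : Int) : Prop := out = computeRecommendedSongsClicks_alt predictions ground_truth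
instance (predictions : List Int) (ground_truth : List Int) (out : Int) : Decidable (Spec_computeRecommendedSongsClicks predictions ground_truth out) := by unfold Spec_computeRecommendedSongsClicks; infer_instance

-- ===== CLAIM (what is proved, stated in full; the proofs are below) =====
def Claim_equal_computeRecommendedSongsClicks : Prop := ∀ (predictions : List Int) (ground_truth : List Int), Dom_computeRecommendedSongsClicks predictions ground_truth → Spec_computeRecommendedSongsClicks predictions ground_truth (computeRecommendedSongsClicks predictions ground_truth)

-- ===== LEMMAS AND PROOFS =====

-- the common reference value: chunk index of the first prediction found in ground_truth, else 51
def pvRef (predictions ground_truth : List Int) : Int :=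
  match predictions.findIdx? (fun v => ground_truth.contains v) with
  | some j => ((j / 10 : Nat) : Int)
  | none => 51

lemma pvSetContains (g : List Int) (v : Int) :
    PySem.Set.contains (PySem.Set.ofList g) v = g.contains v := by
  by_cases h : v ∈ g
  · simp [PySem.Set.contains_eq_listContains, PySem.Set.mem_ofList, h]
  · simp [PySem.Set.contains_eq_listContains, PySem.Set.mem_ofList, h]

lemma pyRange_ten_nil (b : Int) (hb : b ≤ 0) : PySem.List.pyRange 0 b 10 = [] := by
  rw [PySem.List.pyRange_of_pos 0 b (by norm_num)]
  simp [show ¬ (0:Int) < b by omega]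

lemma pyRange_ten_cons (b : Int) (hb : 0 < b) :
    PySem.List.pyRange 0 b 10 = 0 :: (PySem.List.pyRange 0 (b - 10) 10).map (· + 10) := by
  rw [PySem.List.pyRange_of_pos 0 b (by norm_num),
      PySem.List.pyRange_of_pos 0 (b - 10) (by norm_num)]
  have hm : (if (0:Int) < b then ((b - 0 + 10 - 1) / 10).toNat else 0)
      = (if (0:Int) < b - 10 then ((b - 10 - 0 + 10 - 1) / 10).toNat else 0) + 1 := by
    split_ifs <;> omega
  rw [hm, List.range_succ_eq_map, List.map_cons, List.map_map, List.map_map]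
  refine List.cons_eq_cons.mpr ⟨by norm_num, ?_⟩
  · apply List.map_congr_left
    intro k _
    simp only [Function.comp_apply, Nat.succ_eq_add_one]
    push_cast
    ring

lemma pvAGo_shift (p g : List Int) (idxs : List Int) (c : Int)
    (h : ∀ i ∈ idxs, 0 ≤ i) :
    pvAGo p g (idxs.map (· + 10)) c = pvAGo (p.drop 10) g idxs c := by
  induction idxs generalizing c with
  | nil => rfl
  | cons i rest ih =>
    have hi : 0 ≤ i := h i (by simp)
    have hslice : PySem.List.slice p (some (i + 10)) (some (i + 10 + 10))
        = PySem.List.slice (p.drop 10) (some i) (some (i + 10)) := by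
      rw [PySem.List.slice_toNat p (by omega) (by omega),
          PySem.List.slice_toNat _ hi (by omega), List.drop_drop]
      have h1 : (i + 10 + 10).toNat - (i + 10).toNat = (i + 10).toNat - i.toNat := by omega
      have h2 : (i + 10).toNat = 10 + i.toNat := by omega
      rw [h1, h2]
    simp only [List.map_cons, pvAGo, hslice]
    split
    · rfl
    · exact ih _ (fun j hj => h j (List.mem_cons_of_mem _ hj))

lemma findIdx?_some_lt {l : List Int} {f : Int → Bool} {j : Nat}
    (h : l.findIdx? f = some j) : j < l.length :=
  (List.findIdx?_eq_some_iff_findIdx_eq.mp h).1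

lemma pvAGo_eq (g : List Int) : ∀ (n : Nat) (p : List Int), p.length = n → ∀ (c : Nat),
    pvAGo p g (PySem.List.pyRange 0 (p.length : Int) 10) (c : Int)
      = match p.findIdx? (fun v => g.contains v) with
        | some j => ((c + j / 10 : Nat) : Int)
        | none => 51 := by
  intro n
  induction n using Nat.strong_induction_on with
  | _ n ih =>
    intro p hp c
    by_cases hnil : p = []
    · subst hnil
      simp [pvAGo, pyRange_ten_nil 0 (by norm_num)]
    · have hpos : 0 < p.length := List.length_pos_iff.mpr hnil
      rw [pyRange_ten_cons _ (by exact_mod_cast hpos)]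
      simp only [pvAGo]
      have hslice0 : PySem.List.slice p (some 0) (some (0 + 10)) = p.take 10 := by
        rw [PySem.List.slice_toNat p (by norm_num) (by norm_num)]
        rfl
      rw [hslice0]
      have hsplit : p = p.take 10 ++ p.drop 10 := (List.take_append_drop 10 p).symm
      by_cases hhit : ∃ v ∈ p.take 10, g.contains v = true
      · -- overlap in the first chunk: A returns c; first hit index < 10
        obtain ⟨v, hv, hgv⟩ := hhit
        have hfil : ((p.take 10).filter (fun value => g.contains value)).length > 0 := by
          have : v ∈ (p.take 10).filter (fun value => g.contains value) :=
            List.mem_filter.mpr ⟨hv, hgv⟩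
          exact List.length_pos_iff.mpr (List.ne_nil_of_mem this)
        rw [if_pos hfil]
        have hsome : ((p.take 10).findIdx? (fun v => g.contains v)).isSome := by
          rw [List.findIdx?_isSome]
          exact List.any_eq_true.mpr ⟨v, hv, hgv⟩
        obtain ⟨j0, hj0⟩ := Option.isSome_iff_exists.mp hsome
        have hj0lt : j0 < 10 := by
          have := findIdx?_some_lt hj0
          have hle : (p.take 10).length ≤ 10 := by
            simp [List.length_take]
          omega
        have hfind : p.findIdx? (fun v => g.contains v) = some j0 := by
          conv_lhs => rw [hsplit]
          rw [List.findIdx?_append, hj0]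
          rfl
        rw [hfind]
        have : j0 / 10 = 0 := Nat.div_eq_of_lt hj0lt
        simp [this]
      · -- no overlap in the first chunk: recurse on the remaining predictions
        have hhit' : ∀ a ∈ p.take 10, g.contains a = false := by
          intro a ha
          cases hca : g.contains a
          · rfl
          · exact absurd ⟨a, ha, hca⟩ hhit
        have hfe : (p.take 10).filter (fun value => g.contains value) = [] :=
          List.filter_eq_nil_iff.mpr (fun a ha => by simpa using hhit' a ha)
        have hfil : ¬ ((p.take 10).filter (fun value => g.contains value)).length > 0 := by
          rw [hfe]; simp
        rw [if_neg hfil]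
        have hnonneg : ∀ i ∈ PySem.List.pyRange 0 ((p.length : Int) - 10) 10, 0 ≤ i := by
          intro i hi
          exact ((PySem.List.mem_pyRange_iff_of_pos (by norm_num) i).mp hi).1
        rw [pvAGo_shift p g _ _ hnonneg]
        have hrange : PySem.List.pyRange 0 ((p.length : Int) - 10) 10
            = PySem.List.pyRange 0 ((p.drop 10).length : Int) 10 := by
          by_cases h10 : 10 ≤ p.length
          · congr 1
            simp [List.length_drop]
            omega
          · rw [pyRange_ten_nil _ (by omega),
                pyRange_ten_nil _ (by simp [List.length_drop]; omega)]
        rw [hrange]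
        have hc1 : (c : Int) + 1 = ((c + 1 : Nat) : Int) := by omega
        rw [hc1, ih (p.drop 10).length (by simp [List.length_drop]; omega) (p.drop 10) rfl (c + 1)]
        have hnof : (p.take 10).findIdx? (fun v => g.contains v) = none := by
          rw [List.findIdx?_eq_none_iff]
          exact fun a ha => by simpa using hhit' a ha
        have hfind : p.findIdx? (fun v => g.contains v)
            = ((p.drop 10).findIdx? (fun v => g.contains v)).map (fun i => i + (p.take 10).length) := by
          conv_lhs => rw [hsplit]
          rw [List.findIdx?_append, hnof]
          rfl
        rw [hfind]
        cases hdrop : (p.drop 10).findIdx? (fun v => g.contains v) with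
        | none => rfl
        | some j' =>
          have hd : j' < (p.drop 10).length := findIdx?_some_lt hdrop
          have hplen : 10 ≤ p.length := by
            rw [List.length_drop] at hd
            omega
          have hlen10 : (p.take 10).length = 10 := by
            rw [List.length_take]
            omega
          simp only [Option.map_some]
          rw [hlen10]
          congr 1
          rw [Nat.add_div_right j' (by norm_num)]
          omega

lemma pvBGo_eq (g : List Int) : ∀ (p : List Int) (s : Nat),
    pvBGo (PySem.Set.ofList g) (PySem.List.enumerate p (s : Int))
      = match p.findIdx? (fun v => g.contains v) with
        | some j => (((s + j) / 10 : Nat) : Int)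
        | none => 51 := by
  intro p
  induction p with
  | nil => intro s; simp [pvBGo, PySem.List.enumerate_nil]
  | cons v rest ih =>
    intro s
    rw [PySem.List.enumerate_cons]
    simp only [pvBGo, List.findIdx?_cons, pvSetContains]
    by_cases hv : g.contains v
    · rw [if_pos hv, if_pos hv]
      have h10 : (10 : Int) = ((10 : Nat) : Int) := by norm_num
      rw [h10, PySem.Int.floordiv_natCast]
      norm_num
    · rw [if_neg hv, if_neg hv]
      have hc1 : (s : Int) + 1 = ((s + 1 : Nat) : Int) := by omega
      rw [hc1, ih (s + 1)]
      cases rest.findIdx? (fun v => g.contains v) with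
      | none => rfl
      | some j' =>
        simp only [Option.map_some]
        congr 1
        omega

-- ===== VERDICT (by name: the statement is the Claim_ definition above) =====
theorem computeRecommendedSongsClicks_spec : Claim_equal_computeRecommendedSongsClicks := by
  intro predictions ground_truth _
  unfold Spec_computeRecommendedSongsClicks computeRecommendedSongsClicks computeRecommendedSongsClicks_alt
  rw [PySem.List.len_eq]
  have hA := pvAGo_eq ground_truth predictions.length predictions rfl 0
  have hB := pvBGo_eq ground_truth predictions 0
  norm_num at hA hB
  rw [hA, hB]
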